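-- pv_equiv track=rewrite | github.com/Tiburso/Trabalhos-IST | FP/Projetos/Trabalho FP1.py | posicoes_adjacentes
-- ===== SOURCE A (Python) =====
-- def eh_posicao(pos):
--     #confirma se e uma posição valida
--     if type(pos) is not tuple:
--         return False
--     if len(pos) != 2:
--         return False
--     for i in pos:
--         if not isinstance(i,int) or i < 0:
--             return False
--     return True
--
-- def posicoes_adjacentes(pos):
--     #devolve um tuplo correspondente as coordenadas adjacentes da posicao
--     if not eh_posicao(pos):
--         raise ValueError('posicoes_adjacentes: argumento invalido')
--     pos_adjacentes_t = (((pos[0],pos[1]-1),(pos[0]-1,pos[1]),(pos[0]+1,pos[1]),(pos[0],pos[1]+1)))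
--     pos_adjacentes_f = ()
--     for check_ in pos_adjacentes_t:
--         if eh_posicao(check_):
--             pos_adjacentes_f += (check_,)
--     return pos_adjacentes_f
-- ===== SOURCE B (Python) =====
-- def eh_posicao(pos):
--     #confirma se e uma posição valida
--     if type(pos) is not tuple:
--         return False
--     if len(pos) != 2:
--         return False
--     for i in pos:
--         if not isinstance(i, int) or i < 0:
--             return False
--     return True
--
-- # offset templates per boundary class (x > 0?, y > 0?); candidates that would
-- # leave the grid are absent from the template, order matches the original
-- _OFFSETS = {
--     (False, False): ((1, 0), (0, 1)),
--     (False, True):  ((0, -1), (1, 0), (0, 1)),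
--     (True, False):  ((-1, 0), (1, 0), (0, 1)),
--     (True, True):   ((0, -1), (-1, 0), (1, 0), (0, 1)),
-- }
--
-- def posicoes_adjacentes(pos):
--     # select the offset template for pos's boundary class and translate it
--     if not eh_posicao(pos):
--         raise ValueError('posicoes_adjacentes: argumento invalido')
--     x, y = pos
--     return tuple((x + dx, y + dy) for dx, dy in _OFFSETS[(x > 0, y > 0)])
-- ===== Notes on version B (the rewrite author's own statement) =====
-- stated objective: alternative
-- what changed: Replaces generate-four-candidates-then-filter-through-eh_posicao by a precomputed table of offset templates keyed by the position's boundary class (x>0, y>0); the chosen template is translated by one map, so no candidate is ever constructed and revalidated.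
import Mathlib
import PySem

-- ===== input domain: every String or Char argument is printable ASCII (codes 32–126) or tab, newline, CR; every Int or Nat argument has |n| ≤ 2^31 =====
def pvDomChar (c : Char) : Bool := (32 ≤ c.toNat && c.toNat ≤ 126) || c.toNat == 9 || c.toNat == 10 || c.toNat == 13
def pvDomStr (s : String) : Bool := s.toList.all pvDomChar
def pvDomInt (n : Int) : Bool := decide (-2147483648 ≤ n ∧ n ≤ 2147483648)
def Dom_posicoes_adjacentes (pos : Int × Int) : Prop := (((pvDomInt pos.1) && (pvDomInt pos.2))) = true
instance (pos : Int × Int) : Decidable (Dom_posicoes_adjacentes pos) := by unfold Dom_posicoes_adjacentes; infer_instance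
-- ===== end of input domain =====

-- B selects a precomputed offset template keyed by the boundary class (x>0, y>0) and translates
-- it by one map, instead of filtering four candidates through eh_posicao (objective: alternative).
-- Return-value equivalence on Pre_ (A raises ValueError outside it).

-- ===== PORT A =====
-- eh_posicao restricted to an (Int × Int) argument: tuple/len/int checks are true by type,
-- so only the non-negativity of both components remains.
def eh_posicao (pos : Int × Int) : Bool :=
  !(pos.1 < 0) && !(pos.2 < 0)

def posicoes_adjacentes (pos : Int × Int) : List (Int × Int) :=
  -- the guard `if not eh_posicao(pos): raise ValueError` is excluded by Pre_
  let pos_adjacentes_t : List (Int × Int) :=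
    [(pos.1, pos.2 - 1), (pos.1 - 1, pos.2), (pos.1 + 1, pos.2), (pos.1, pos.2 + 1)]
  pos_adjacentes_t.foldl (fun acc check_ => if eh_posicao check_ then acc ++ [check_] else acc) []

-- ===== PORT B =====
-- offset templates per boundary class (x > 0?, y > 0?)
def pvOffsets (bx by_ : Bool) : List (Int × Int) :=
  match bx, by_ with
  | false, false => [(1, 0), (0, 1)]
  | false, true  => [(0, -1), (1, 0), (0, 1)]
  | true,  false => [(-1, 0), (1, 0), (0, 1)]
  | true,  true  => [(0, -1), (-1, 0), (1, 0), (0, 1)]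

def posicoes_adjacentes_alt (pos : Int × Int) : List (Int × Int) :=
  -- the ValueError guard is excluded by Pre_
  (pvOffsets (decide (pos.1 > 0)) (decide (pos.2 > 0))).map
    (fun d => (pos.1 + d.1, pos.2 + d.2))

-- ===== PRECONDITION & SPEC =====
-- Pre_ excludes exactly the inputs on which A (and B) raise ValueError: a negative coordinate.
def Pre_posicoes_adjacentes (pos : Int × Int) : Prop := 0 ≤ pos.1 ∧ 0 ≤ pos.2
instance (pos : Int × Int) : Decidable (Pre_posicoes_adjacentes pos) := by unfold Pre_posicoes_adjacentes; infer_instance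
def pvWitness_posicoes_adjacentes : (Int × Int) := (0, 0)

def Spec_posicoes_adjacentes (pos : Int × Int) (out : List (Int × Int)) : Prop := out = posicoes_adjacentes_alt pos
instance (pos : Int × Int) (out : List (Int × Int)) : Decidable (Spec_posicoes_adjacentes pos out) := by unfold Spec_posicoes_adjacentes; infer_instance

-- ===== CLAIM =====
def Claim_equal_posicoes_adjacentes : Prop := ∀ (pos : Int × Int), Dom_posicoes_adjacentes pos → Pre_posicoes_adjacentes pos → Spec_posicoes_adjacentes pos (posicoes_adjacentes pos)

-- ===== LEMMAS AND PROOFS =====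

-- ===== VERDICT =====
theorem posicoes_adjacentes_spec : Claim_equal_posicoes_adjacentes := by
  intro ⟨x, y⟩ _ ⟨hx, hy⟩
  unfold Spec_posicoes_adjacentes posicoes_adjacentes posicoes_adjacentes_alt eh_posicao
  rcases lt_or_ge 0 x with hx0 | hx0 <;> rcases lt_or_ge 0 y with hy0 | hy0 <;>
    [ rw [decide_eq_true hx0, decide_eq_true hy0]
    ; rw [decide_eq_true hx0, decide_eq_false (by omega : ¬ y > 0)]
    ; rw [decide_eq_false (by omega : ¬ x > 0), decide_eq_true hy0]
    ; rw [decide_eq_false (by omega : ¬ x > 0), decide_eq_false (by omega : ¬ y > 0)] ] <;>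
  · simp only [pvOffsets, List.foldl, List.map, Bool.and_eq_true, Bool.not_eq_true',
      decide_eq_false_iff_not, not_lt, List.nil_append]
    split_ifs <;> first | omega | (simp only [List.cons_append, List.nil_append, List.cons.injEq, Prod.mk.injEq]; and_intros <;> first | trivial | omega)
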